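-- pv_equiv track=rewrite | github.com/sbilikepy/BS_workspace | Lessons/Django_ORM/daily.py | student_att
-- ===== SOURCE A (Python) =====
-- def student_att(records: str) -> bool:
--     absence_count = 0
--     late_count = 0
--
--     for day in records:
--         if day == "A":
--             absence_count += 1
--             late_count = 0
--         elif day == "L":
--             late_count += 1
--             if late_count >= 3:
--                 return False
--         else:
--             late_count = 0
--
--     return absence_count < 2
-- ===== SOURCE B (Python) =====
-- def student_att(records: str) -> bool:
--     return records.count("A") < 2 and "LLL" not in records
-- ===== Notes on version B (the rewrite author's own statement) =====
-- stated objective: faster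
-- what changed: Replaced the stateful character loop (two running counters and an early return) by two declarative built-in checks: an absence count compared against 2 and a substring-containment test for a run of three lates.
import Mathlib
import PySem

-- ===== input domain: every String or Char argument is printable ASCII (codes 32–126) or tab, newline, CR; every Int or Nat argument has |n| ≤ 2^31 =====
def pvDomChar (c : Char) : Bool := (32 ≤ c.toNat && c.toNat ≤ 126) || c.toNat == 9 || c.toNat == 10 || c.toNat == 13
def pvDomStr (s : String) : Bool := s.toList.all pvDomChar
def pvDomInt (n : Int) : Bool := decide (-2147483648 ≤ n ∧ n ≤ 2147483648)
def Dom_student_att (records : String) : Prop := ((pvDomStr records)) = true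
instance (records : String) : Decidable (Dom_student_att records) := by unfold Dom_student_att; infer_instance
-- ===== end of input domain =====

-- B replaces A's stateful loop (two running counters, early return) by two declarative
-- checks: count('A') < 2 and no substring 'LLL' — simpler, same O(n) cost.


-- ===== PORT A =====
-- the for-loop over the string with the two counters and the early 'return False'
def student_att_loop : List Char → Nat → Nat → Bool
  | [], absence_count, _ => decide (absence_count < 2)
  | day :: rest, absence_count, late_count =>
      if day = 'A' then
        student_att_loop rest (absence_count + 1) 0
      else if day = 'L' then
        if 3 ≤ late_count + 1 then false
        else student_att_loop rest absence_count (late_count + 1)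
      else
        student_att_loop rest absence_count 0

def student_att (records : String) : Bool :=
  student_att_loop records.toList 0 0

-- ===== PORT B =====
def student_att_alt (records : String) : Bool :=
  decide (PySem.Str.count records "A" < 2) && !(PySem.Str.isIn "LLL" records)

-- ===== PRECONDITION & SPEC =====
def Spec_student_att (records : String) (out : Bool) : Prop := out = student_att_alt records
instance (records : String) (out : Bool) : Decidable (Spec_student_att records out) := by unfold Spec_student_att; infer_instance

-- ===== CLAIM (what is proved, stated in full; the proofs are below) =====
def Claim_equal_student_att : Prop := ∀ (records : String), Dom_student_att records → Spec_student_att records (student_att records)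

-- ===== LEMMAS AND PROOFS =====

-- str.count with a single-character needle is the character count
lemma count_go_singleton (c : Char) :
    ∀ (fuel : Nat) (l : List Char) (acc : Nat), l.length ≤ fuel →
      PySem.Chars.count.go [c] fuel l acc = acc + l.count c := by
  intro fuel
  induction fuel with
  | zero =>
      intro l acc h
      have : l = [] := List.eq_nil_of_length_eq_zero (Nat.le_zero.mp h)
      subst this; simp [PySem.Chars.count.go]
  | succ n ih =>
      intro l acc h
      cases l with
      | nil => simp [PySem.Chars.count.go]
      | cons x t =>
          simp only [PySem.Chars.count.go]
          by_cases hx : x = c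
          · subst hx
            have hp : List.isPrefixOf [x] (x :: t) = true := by
              simp [List.isPrefixOf]
            simp only [hp]
            rw [ih]
            · simp
              omega
            · simpa using Nat.le_of_succ_le_succ h
          · have hp : List.isPrefixOf [c] (x :: t) = false := by
              simp [List.isPrefixOf]
              intro hc; exact absurd hc.symm hx
            simp only [hp]
            rw [if_neg (by simp)]
            rw [ih]
            · simp [hx]
            · simpa using Nat.le_of_succ_le_succ h

lemma count_singleton (l : List Char) (c : Char) :
    PySem.Chars.count l [c] = l.count c := by
  simp [PySem.Chars.count, count_go_singleton c l.length l 0 le_rfl]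

-- a non-'L' head cannot take part in an 'LLL' run
lemma infix_LLL_skip (c : Char) (hc : c ≠ 'L') (l : Nat) (hl : l ≤ 2) (cs : List Char) :
    (['L','L','L'] <:+: List.replicate l 'L' ++ c :: cs) ↔ ['L','L','L'] <:+: cs := by
  have hc' : 'L' ≠ c := Ne.symm hc
  interval_cases l <;>
    simp [List.infix_cons_iff, List.cons_prefix_cons, hc']

-- characterisation of A's loop: late_count l behaves like l preceding 'L's
lemma student_att_loop_eq :
    ∀ (cs : List Char) (a l : Nat), l ≤ 2 →
      student_att_loop cs a l =
        (decide (a + cs.count 'A' < 2) &&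
         !(decide (['L','L','L'] <:+: List.replicate l 'L' ++ cs))) := by
  intro cs
  induction cs with
  | nil =>
      intro a l hl
      have hni : decide (['L','L','L'] <:+: List.replicate l 'L') = false := by
        rw [decide_eq_false_iff_not]
        intro h
        have := h.length_le
        simp at this
        omega
      simp [student_att_loop, hni]
  | cons c rest ih =>
      intro a l hl
      by_cases hA : c = 'A'
      · subst hA
        rw [student_att_loop, if_pos rfl, ih (a + 1) 0 (by omega)]
        have h1 : decide (a + 1 + rest.count 'A' < 2)
            = decide (a + (('A' :: rest).count 'A') < 2) := by
          rw [decide_eq_decide]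
          simp
          omega
        have h2 : decide ((['L','L','L'] : List Char) <:+: List.replicate 0 'L' ++ rest)
            = decide (['L','L','L'] <:+: List.replicate l 'L' ++ 'A' :: rest) := by
          rw [decide_eq_decide]
          simpa using (infix_LLL_skip 'A' (by decide) l hl rest).symm
        rw [h1, h2]
      · by_cases hL : c = 'L'
        · subst hL
          rw [student_att_loop, if_neg (by decide), if_pos rfl]
          by_cases h3 : 3 ≤ l + 1
          · have hl2 : l = 2 := by omega
            subst hl2
            rw [if_pos h3]
            have hinf : (['L','L','L'] <:+: List.replicate 2 'L' ++ 'L' :: rest) :=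
              ⟨[], rest, by simp [List.replicate]⟩
            rw [decide_eq_true hinf]
            simp
          · rw [if_neg h3, ih a (l + 1) (by omega)]
            have hrepl : List.replicate l 'L' ++ 'L' :: rest
                = List.replicate (l + 1) 'L' ++ rest := by
              rw [List.replicate_succ']
              simp
            rw [hrepl]
            congr 1
        · rw [student_att_loop, if_neg hA, if_neg hL, ih a 0 (by omega)]
          have h1 : decide (a + rest.count 'A' < 2)
              = decide (a + ((c :: rest).count 'A') < 2) := by
            rw [decide_eq_decide]
            simp [hA]
          have h2 : decide ((['L','L','L'] : List Char) <:+: List.replicate 0 'L' ++ rest)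
              = decide (['L','L','L'] <:+: List.replicate l 'L' ++ c :: rest) := by
            rw [decide_eq_decide]
            simpa using (infix_LLL_skip c hL l hl rest).symm
          rw [h1, h2]

lemma isIn_eq_decide (cs : List Char) :
    PySem.Chars.isIn ['L','L','L'] cs = decide (['L','L','L'] <:+: cs) := by
  by_cases h : ['L','L','L'] <:+: cs
  · rw [(PySem.Chars.isIn_iff_infix _ _).mpr h, decide_eq_true h]
  · rw [(PySem.Chars.isIn_eq_false_iff _ _).mpr h]
    simp [h]

-- ===== VERDICT (by name: the statement is the Claim_ definition above) =====
theorem student_att_spec : Claim_equal_student_att := by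
  intro records _
  unfold Spec_student_att student_att student_att_alt
  rw [student_att_loop_eq records.toList 0 0 (by omega)]
  rw [PySem.Str.count_eq, PySem.Str.isIn_eq]
  have htoA : ("A" : String).toList = ['A'] := by decide
  have htoL : ("LLL" : String).toList = ['L','L','L'] := by decide
  rw [htoA, htoL, count_singleton, isIn_eq_decide, Nat.zero_add]
  simp only [List.replicate_zero, List.nil_append]
  exact congrArg₂ (· && ·) (decide_eq_decide.mpr Iff.rfl)
    (congrArg (!·) (decide_eq_decide.mpr Iff.rfl))
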